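-- pv_equiv track=rewrite | github.com/thinhhoang95/project-tailwind | src/parrhesia/flow_agent/rate_finder.py | _max_rolling_count
-- ===== SOURCE A (Python) =====
-- from collections import Counter, OrderedDict
-- from typing import Any, Callable, ContextManager, Dict, Iterable, List, Mapping, Optional, Sequence, Tuple, Union
--
-- def _max_rolling_count(counter: Counter[int], bins: Sequence[int], window: int) -> int:
--     if not counter:
--         return 0
--     if window <= 1:
--         return max(counter.get(b, 0) for b in bins) if bins else 0
--     if not bins:
--         keys = list(counter.keys())
--         bins = keys
--     start = min(bins)
--     end = max(bins) + window
--     length = max(0, end - start)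
--     if length <= 0:
--         return 0
--     series = [0] * length
--     for idx, count in counter.items():
--         offset = int(idx) - start
--         if 0 <= offset < length:
--             series[offset] += int(count)
--     window = min(window, len(series))
--     if window <= 0:
--         return 0
--     current = sum(series[:window])
--     best = current
--     for i in range(1, len(series) - window + 1):
--         current = current - series[i - 1] + series[i + window - 1]
--         if current > best:
--             best = current
--     return best
-- ===== SOURCE B (Python) =====
-- def _max_rolling_count(counter, bins, window):
--     if not counter:
--         return 0
--     if window <= 1:
--         return max((counter.get(b, 0) for b in bins), default=0)
--     ref = bins if bins else list(counter.keys())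
--     lo = min(ref)
--     hi = max(ref)
--     keys = sorted(k for k in counter if lo <= k < hi + window)
--     # window starts where the window's content can change, clamped into [lo, hi]
--     cands = {lo}
--     for k in keys:
--         for s in (k - window + 1, k + 1):
--             if lo <= s <= hi:
--                 cands.add(s)
--     best = None
--     i = j = 0  # keys[i:j] are the keys inside the current window
--     cur = 0
--     for s in sorted(cands):
--         while j < len(keys) and keys[j] < s + window:
--             cur += counter[keys[j]]
--             j += 1
--         while i < len(keys) and keys[i] < s:
--             cur -= counter[keys[i]]
--             i += 1
--         if best is None or cur > best:
--             best = cur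
--     return best
-- ===== Notes on version B (the rewrite author's own statement) =====
-- stated objective: alternative
-- what changed: A materialises a dense series array over the whole bin span and slides a window across every offset; B instead sorts the counter's nonzero keys, collects the O(k) candidate window starts where the window content can change, and evaluates them with a two-pointer running sum, so its cost depends on the number of distinct keys rather than on the bin span.
import Mathlib
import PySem

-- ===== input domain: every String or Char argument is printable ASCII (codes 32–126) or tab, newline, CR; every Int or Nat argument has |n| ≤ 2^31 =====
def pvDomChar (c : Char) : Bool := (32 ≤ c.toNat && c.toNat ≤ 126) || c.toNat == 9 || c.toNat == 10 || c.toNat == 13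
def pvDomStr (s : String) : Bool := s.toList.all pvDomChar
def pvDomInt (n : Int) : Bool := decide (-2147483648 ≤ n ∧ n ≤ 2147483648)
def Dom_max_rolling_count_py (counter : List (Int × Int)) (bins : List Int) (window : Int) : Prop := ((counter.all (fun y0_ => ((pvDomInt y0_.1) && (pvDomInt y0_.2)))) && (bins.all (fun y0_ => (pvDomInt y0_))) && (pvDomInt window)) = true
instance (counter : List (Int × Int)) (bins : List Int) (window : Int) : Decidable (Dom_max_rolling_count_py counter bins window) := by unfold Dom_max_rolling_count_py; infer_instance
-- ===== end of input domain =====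

-- B replaces A's dense series array over the whole bin span and its O(span) sliding-window scan by a
-- sweep over the sorted nonzero keys only: candidate window starts + two-pointer running sum (objective:
-- alternative algorithm; not measured faster on the timing generator's dense inputs).

-- ===== PORT A =====
-- helper: the dense series array A builds ('series[offset] += count' over counter.items())
def pvSeriesStep (start length : Int) (ser : List Int) (kv : Int × Int) : List Int :=
  let offset := kv.1 - start
  if 0 ≤ offset ∧ offset < length then ser.modify offset.toNat (· + kv.2) else ser

def pvSeriesA (d : PySem.Dict Int Int) (start length : Int) : List Int :=
  d.items.foldl (pvSeriesStep start length) (List.replicate length.toNat 0)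

-- helper: A's sliding-window loop ('current = current - series[i-1] + series[i+window-1]; best = max')
def pvSlideA (series : List Int) (w : Int) : Int :=
  ((PySem.List.pyRange 1 ((series.length : Int) - w + 1)).foldl
    (fun (st : Int × Int) i =>
      let cur := st.1 - series.getD (i - 1).toNat 0 + series.getD (i + w - 1).toNat 0
      (cur, if cur > st.2 then cur else st.2))
    ((series.take w.toNat).sum, (series.take w.toNat).sum)).2

def max_rolling_count_py (counter : List (Int × Int)) (bins : List Int) (window : Int) : Int :=
  let d := PySem.Dict.ofList counter
  if d.items = [] then 0
  else if window ≤ 1 then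
    (if bins = [] then 0
     else (PySem.List.max? (bins.map (fun b => d.getD b 0)) (fun x => x)).getD 0)
  else
    let bins' := if bins = [] then d.keys else bins
    let start := (PySem.List.min? bins' (fun x => x)).getD 0
    let stop := (PySem.List.max? bins' (fun x => x)).getD 0 + window
    let length := max 0 (stop - start)
    if length ≤ 0 then 0
    else
      let series := pvSeriesA d start length
      let w := min window (series.length : Int)
      if w ≤ 0 then 0 else pvSlideA series w

-- ===== PORT B =====
-- helper: 'while j < len(keys) and keys[j] < t: cur += counter[keys[j]]; j += 1' (suffix from j)
def pvTakeAdd (d : PySem.Dict Int Int) (t : Int) : List Int → Int → (List Int × Int)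
  | [], cur => ([], cur)
  | k :: ks, cur => if k < t then pvTakeAdd d t ks (cur + d.getD k 0) else (k :: ks, cur)

-- helper: 'while i < len(keys) and keys[i] < t: cur -= counter[keys[i]]; i += 1' (suffix from i)
def pvTakeSub (d : PySem.Dict Int Int) (t : Int) : List Int → Int → (List Int × Int)
  | [], cur => ([], cur)
  | k :: ks, cur => if k < t then pvTakeSub d t ks (cur - d.getD k 0) else (k :: ks, cur)

-- helper: the body of B's 'for k in keys' loop that collects candidate window starts
def pvCandStep (w lo hi : Int) (c : PySem.Set Int) (k : Int) : PySem.Set Int :=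
  let c1 := if lo ≤ k - w + 1 ∧ k - w + 1 ≤ hi then PySem.Set.add c (k - w + 1) else c
  if lo ≤ k + 1 ∧ k + 1 ≤ hi then PySem.Set.add c1 (k + 1) else c1

-- helper: the body of B's 'for s in sorted(cands)' loop; state = (keys[i:], keys[j:], cur, best)
def pvSweep (d : PySem.Dict Int Int) (w : Int)
    (st : List Int × List Int × Int × Option Int) (s : Int) :
    List Int × List Int × Int × Option Int :=
  let (kJ', cur') := pvTakeAdd d (s + w) st.2.1 st.2.2.1
  let (kI', cur'') := pvTakeSub d s st.1 cur'
  let best' := match st.2.2.2 with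
    | none => some cur''
    | some b => some (if cur'' > b then cur'' else b)
  (kI', kJ', cur'', best')

def max_rolling_count_py_alt (counter : List (Int × Int)) (bins : List Int) (window : Int) : Int :=
  let d := PySem.Dict.ofList counter
  if d.items = [] then 0
  else if window ≤ 1 then
    (PySem.List.max? (bins.map (fun b => d.getD b 0)) (fun x => x)).getD 0
  else
    let ref := if bins = [] then d.keys else bins
    let lo := (PySem.List.min? ref (fun x => x)).getD 0
    let hi := (PySem.List.max? ref (fun x => x)).getD 0
    let keys := PySem.List.sorted (d.keys.filter (fun k => decide (lo ≤ k) && decide (k < hi + window))) (fun x => x)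
    let cands := keys.foldl (pvCandStep window lo hi) (PySem.Set.ofList [lo])
    let scands := PySem.List.sorted cands (fun x => x)
    ((scands.foldl (pvSweep d window) (keys, keys, 0, none)).2.2.2).getD 0

-- ===== PRECONDITION & SPEC =====
def Spec_max_rolling_count_py (counter : List (Int × Int)) (bins : List Int) (window : Int) (out : Int) : Prop := out = max_rolling_count_py_alt counter bins window
instance (counter : List (Int × Int)) (bins : List Int) (window : Int) (out : Int) : Decidable (Spec_max_rolling_count_py counter bins window out) := by unfold Spec_max_rolling_count_py; infer_instance

-- ===== CLAIM (what is proved, stated in full; the proofs are below) =====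
def Claim_equal_max_rolling_count_py : Prop := ∀ (counter : List (Int × Int)) (bins : List Int) (window : Int), Dom_max_rolling_count_py counter bins window → Spec_max_rolling_count_py counter bins window (max_rolling_count_py counter bins window)

-- ===== LEMMAS AND PROOFS =====

-- the common mathematical value: the count mass of the window [s, s+w)
def pvF (d : PySem.Dict Int Int) (w s : Int) : Int :=
  (d.items.map (fun kv => if s ≤ kv.1 ∧ kv.1 < s + w then kv.2 else 0)).sum

-- max of f over the integer interval [lo, lo+n]
def pvMaxOver (f : Int → Int) (lo : Int) : Nat → Int
  | 0 => f lo
  | n + 1 => max (pvMaxOver f lo n) (f (lo + (n : Int) + 1))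

-- prefix sum of the first n entries of a series (getD-based)
def pvPS (ser : List Int) (n : Nat) : Int := ((List.range n).map (fun j => ser.getD j 0)).sum

theorem pvPS_succ (ser : List Int) (n : Nat) : pvPS ser (n + 1) = pvPS ser n + ser.getD n 0 := by
  simp [pvPS, List.range_succ]

theorem pvTake_sum (ser : List Int) (n : Nat) (h : n ≤ ser.length) :
    (ser.take n).sum = pvPS ser n := by
  induction n with
  | zero => simp [pvPS]
  | succ m ih =>
    rw [List.take_add_one, pvPS_succ, List.sum_append, ih (by omega)]
    have hm : m < ser.length := by omega
    simp [List.getElem?_eq_getElem hm, List.getD]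

theorem pvMaxOver_ge (f : Int → Int) (lo : Int) (n t : Nat) (ht : t ≤ n) :
    f (lo + (t : Int)) ≤ pvMaxOver f lo n := by
  induction n with
  | zero => interval_cases t <;> simp [pvMaxOver]
  | succ m ih =>
    rcases Nat.lt_or_ge t (m + 1) with h | h
    · exact le_trans (ih (by omega)) (le_max_left _ _)
    · have : t = m + 1 := by omega
      subst this
      refine le_trans (le_of_eq ?_) (le_max_right _ _)
      push_cast; ring_nf

theorem pvMaxOver_le (f : Int → Int) (lo : Int) (n : Nat) (M : Int)
    (h : ∀ t : Nat, t ≤ n → f (lo + (t : Int)) ≤ M) : pvMaxOver f lo n ≤ M := by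
  induction n with
  | zero => simpa [pvMaxOver] using h 0 (by omega)
  | succ m ih =>
    refine max_le (ih (fun t ht => h t (by omega))) ?_
    have := h (m + 1) (by omega)
    push_cast at this
    rw [add_assoc]
    exact this

-- ---------- PART A ----------

theorem pvSeriesA_spec (start length : Int) (items : List (Int × Int)) (ser : List Int) :
    (items.foldl (pvSeriesStep start length) ser).length = ser.length ∧
    ((ser.length : Int) = length →
      ∀ j : Nat, j < ser.length →
        (items.foldl (pvSeriesStep start length) ser).getD j 0
          = ser.getD j 0 + (items.map (fun kv => if kv.1 = start + (j : Int) then kv.2 else 0)).sum) := by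
  induction items generalizing ser with
  | nil => simp
  | cons kv items ih =>
    simp only [List.foldl_cons, List.map_cons, List.sum_cons]
    by_cases h : 0 ≤ kv.1 - start ∧ kv.1 - start < length
    · have hstep : pvSeriesStep start length ser kv = ser.modify (kv.1 - start).toNat (· + kv.2) := by
        simp only [pvSeriesStep]; rw [if_pos h]
      rw [hstep]
      refine ⟨(ih _).1.trans (List.length_modify ..), ?_⟩
      intro hlen j hj
      have hlen' : (ser.modify (kv.1 - start).toNat (· + kv.2)).length = ser.length :=
        List.length_modify ..
      rw [(ih _).2 (by rw [hlen']; exact hlen) j (by omega)]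
      have hj' : j < ser.length := hj
      have hgd : (ser.modify (kv.1 - start).toNat (· + kv.2)).getD j 0
          = if (kv.1 - start).toNat = j then ser.getD j 0 + kv.2 else ser.getD j 0 := by
        rw [List.getD_eq_getElem _ _ (by omega), List.getD_eq_getElem _ _ hj',
          List.getElem_modify]
      rw [hgd]
      by_cases hk : kv.1 = start + (j : Int)
      · have heq : (kv.1 - start).toNat = j := by omega
        rw [if_pos heq, if_pos hk]; ring
      · have hne : (kv.1 - start).toNat ≠ j := by omega
        rw [if_neg hne, if_neg hk]; ring
    · have hstep : pvSeriesStep start length ser kv = ser := by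
        simp only [pvSeriesStep]; rw [if_neg h]
      rw [hstep]
      refine ⟨(ih _).1, ?_⟩
      intro hlen j hj
      rw [(ih _).2 hlen j hj]
      have hk : kv.1 ≠ start + (j : Int) := by omega
      rw [if_neg hk]; ring

theorem pvSum_swap (l : List (Int × Int)) (m : Nat) (G : Nat → (Int × Int) → Int) :
    ((List.range m).map (fun (j : Nat) => (l.map (G j)).sum)).sum
      = (l.map (fun x => ((List.range m).map (fun (j : Nat) => G j x)).sum)).sum := by
  induction l with
  | nil => simp
  | cons x l ih =>
    simp only [List.map_cons, List.sum_cons]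
    rw [PySem.List.sum_map_add_int, ih]

theorem pvRange_ind (m : Nat) (c k v : Int) :
    ((List.range m).map (fun (j : Nat) => if k = c + (j : Int) then v else 0)).sum
      = if c ≤ k ∧ k < c + (m : Int) then v else 0 := by
  induction m with
  | zero => simp
  | succ n ih =>
    rw [List.range_succ, List.map_append, List.sum_append, ih]
    simp only [List.map_cons, List.map_nil, List.sum_cons, List.sum_nil]
    by_cases h1 : c ≤ k ∧ k < c + (n : Int)
    · rw [if_pos h1, if_neg (by omega), if_pos (by push_cast; omega)]; ring
    · rw [if_neg h1]
      by_cases h2 : k = c + (n : Int)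
      · rw [if_pos h2, if_pos (by push_cast; omega)]; ring
      · rw [if_neg h2, if_neg (by push_cast; omega)]; ring

theorem pvPS_diff (ser : List Int) (i : Nat) (wN : Nat) :
    pvPS ser (i + wN) - pvPS ser i = ((List.range wN).map (fun (j : Nat) => ser.getD (i + j) 0)).sum := by
  induction wN with
  | zero => simp
  | succ n ih =>
    rw [show i + (n + 1) = (i + n) + 1 from rfl, pvPS_succ, List.range_succ, List.map_append,
      List.sum_append]
    simp only [List.map_cons, List.map_nil, List.sum_cons, List.sum_nil]
    omega

-- window sum of the series = pvF at the corresponding absolute position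
theorem pvWS_eq (d : PySem.Dict Int Int) (ser : List Int) (lo w : Int) (hw : 0 ≤ w)
    (hspec : ∀ j : Nat, j < ser.length →
      ser.getD j 0 = (d.items.map (fun kv => if kv.1 = lo + (j : Int) then kv.2 else 0)).sum)
    (i : Nat) (hiw : i + w.toNat ≤ ser.length) :
    pvPS ser (i + w.toNat) - pvPS ser i = pvF d w (lo + (i : Int)) := by
  rw [pvPS_diff]
  have h1 : ((List.range w.toNat).map (fun (j : Nat) => ser.getD (i + j) 0)).sum
      = ((List.range w.toNat).map (fun (j : Nat) =>
          (d.items.map (fun kv => if kv.1 = (lo + (i : Int)) + (j : Int) then kv.2 else 0)).sum)).sum := by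
    refine congrArg List.sum (List.map_congr_left ?_)
    intro j hj
    have hj' : j < w.toNat := List.mem_range.mp hj
    rw [hspec (i + j) (by omega)]
    refine congrArg List.sum (List.map_congr_left ?_)
    intro kv _
    have : lo + ((i + j : Nat) : Int) = (lo + (i : Int)) + (j : Int) := by push_cast; ring
    rw [this]
  rw [h1, pvSum_swap]
  unfold pvF
  refine congrArg List.sum (List.map_congr_left ?_)
  intro kv _
  rw [pvRange_ind]
  refine if_congr ?_ rfl rfl
  constructor <;> intro hh <;> constructor <;> omega

-- max over Nat indices 0..n
def pvNatMax (f : Nat → Int) : Nat → Int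
  | 0 => f 0
  | n + 1 => max (pvNatMax f n) (f (n + 1))

theorem pvSlide_fold (ser : List Int) (w : Int) (hw : 0 < w)
    (f : Nat → Int) (hf : ∀ i : Nat, f i = pvPS ser (i + w.toNat) - pvPS ser i) :
    ∀ m : Nat,
      ((PySem.List.pyRange 1 ((m : Int) + 1)).foldl
        (fun (st : Int × Int) i =>
          let cur := st.1 - ser.getD (i - 1).toNat 0 + ser.getD (i + w - 1).toNat 0
          (cur, if cur > st.2 then cur else st.2))
        (f 0, f 0)) = (f m, pvNatMax f m) := by
  intro m
  induction m with
  | zero =>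
    have : PySem.List.pyRange 1 ((0 : Nat) + 1 : Int) = [] := by norm_num [PySem.List.pyRange]
    rw [this]
    rfl
  | succ n ih =>
    have hcast : ((n + 1 : Nat) : Int) + 1 = (((n : Int) + 1) + 1) := by push_cast; ring
    rw [hcast, PySem.List.pyRange_one_succ_right (by omega), List.foldl_append, ih]
    simp only [List.foldl_cons, List.foldl_nil]
    have e1 : ((n : Int) + 1 - 1).toNat = n := by omega
    have e2 : ((n : Int) + 1 + w - 1).toNat = n + w.toNat := by omega
    have hrec : f n - ser.getD n 0 + ser.getD (n + w.toNat) 0 = f (n + 1) := by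
      rw [hf n, hf (n + 1)]
      have : (n + 1) + w.toNat = ((n + w.toNat) + 1) := by omega
      rw [this, pvPS_succ, show n + 1 = n + 1 from rfl, pvPS_succ]
      ring
    rw [e1, e2]
    simp only [hrec]
    have hmax : (if f (n + 1) > pvNatMax f n then f (n + 1) else pvNatMax f n)
        = pvNatMax f (n + 1) := by
      show _ = max (pvNatMax f n) (f (n + 1))
      split_ifs <;> omega
    rw [hmax]

theorem pvSlideA_spec (ser : List Int) (w : Int) (hw : 0 < w) (hlen : w ≤ (ser.length : Int)) :
    pvSlideA ser w = pvNatMax (fun i => pvPS ser (i + w.toNat) - pvPS ser i) (ser.length - w.toNat) := by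
  unfold pvSlideA
  set f : Nat → Int := fun i => pvPS ser (i + w.toNat) - pvPS ser i with hfdef
  have hcur : (ser.take w.toNat).sum = f 0 := by
    rw [pvTake_sum ser w.toNat (by omega), hfdef]
    simp [pvPS]
  have hm : (ser.length : Int) - w + 1 = ((ser.length - w.toNat : Nat) : Int) + 1 := by omega
  rw [hcur, hm, pvSlide_fold ser w hw f (fun i => rfl) (ser.length - w.toNat)]

theorem pvNatMax_eq_maxOver (F : Int → Int) (lo : Int) (n : Nat) (g : Nat → Int)
    (h : ∀ t : Nat, t ≤ n → g t = F (lo + (t : Int))) : pvNatMax g n = pvMaxOver F lo n := by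
  induction n with
  | zero => simpa [pvNatMax, pvMaxOver] using h 0 (by omega)
  | succ m ih =>
    show max (pvNatMax g m) (g (m + 1)) = max (pvMaxOver F lo m) (F (lo + (m : Int) + 1))
    rw [ih (fun t ht => h t (by omega)), h (m + 1) (by omega)]
    have : lo + ((m + 1 : Nat) : Int) = lo + (m : Int) + 1 := by push_cast; ring
    rw [this]

-- PART A main: the else-branch of port A computes the interval max of pvF
theorem portA_eq (d : PySem.Dict Int Int) (w lo hi : Int) (hw : 2 ≤ w) (hlohi : lo ≤ hi) :
    (if max 0 (hi + w - lo) ≤ 0 then 0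
     else if min w ((pvSeriesA d lo (max 0 (hi + w - lo))).length : Int) ≤ 0 then 0
     else pvSlideA (pvSeriesA d lo (max 0 (hi + w - lo)))
            (min w ((pvSeriesA d lo (max 0 (hi + w - lo))).length : Int)))
    = pvMaxOver (pvF d w) lo (hi - lo).toNat := by
  have hlen : max 0 (hi + w - lo) = hi + w - lo := by omega
  rw [if_neg (by omega)]
  set L := max 0 (hi + w - lo) with hLdef
  set series := pvSeriesA d lo L with hser
  have hserspec := pvSeriesA_spec lo L d.items (List.replicate L.toNat 0)
  have hslen : series.length = L.toNat := by
    rw [hser]; unfold pvSeriesA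
    rw [hserspec.1, List.length_replicate]
  have hslenI : (series.length : Int) = L := by omega
  have hwmin : min w (series.length : Int) = w := by omega
  rw [hwmin, if_neg (by omega)]
  have hspec : ∀ j : Nat, j < series.length →
      series.getD j 0 = (d.items.map (fun kv => if kv.1 = lo + (j : Int) then kv.2 else 0)).sum := by
    intro j hj
    have := hserspec.2 (by simp; omega) j (by simp; omega)
    rw [hser]; unfold pvSeriesA
    rw [this]
    simp [List.getD_eq_getElem _ _ (by simp; omega : j < (List.replicate L.toNat (0:Int)).length)]
  rw [pvSlideA_spec series w (by omega) (by omega)]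
  have hidx : series.length - w.toNat = (hi - lo).toNat := by omega
  rw [hidx]
  refine pvNatMax_eq_maxOver _ _ _ _ ?_
  intro t ht
  have htw : t + w.toNat ≤ series.length := by omega
  exact pvWS_eq d series lo w (by omega) hspec t htw

-- ---------- PART B ----------

theorem pvTakeAdd_spec (d : PySem.Dict Int Int) (t : Int) :
    ∀ (ys : List Int) (cur : Int),
      pvTakeAdd d t ys cur
        = (ys.dropWhile (fun k => decide (k < t)),
           cur + ((ys.takeWhile (fun k => decide (k < t))).map (fun k => d.getD k 0)).sum) := by
  intro ys
  induction ys with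
  | nil => intro cur; simp [pvTakeAdd]
  | cons k ks ih =>
    intro cur
    by_cases h : k < t
    · rw [show pvTakeAdd d t (k :: ks) cur = pvTakeAdd d t ks (cur + d.getD k 0) from by
        simp [pvTakeAdd, h], ih]
      simp only [List.dropWhile_cons, List.takeWhile_cons, decide_eq_true_eq, h, if_pos,
        decide_true, List.map_cons, List.sum_cons]
      rw [Prod.mk.injEq]
      exact ⟨rfl, by ring⟩
    · rw [show pvTakeAdd d t (k :: ks) cur = (k :: ks, cur) from by simp [pvTakeAdd, h]]
      simp [List.dropWhile_cons, List.takeWhile_cons, h]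

theorem pvTakeSub_spec (d : PySem.Dict Int Int) (t : Int) :
    ∀ (ys : List Int) (cur : Int),
      pvTakeSub d t ys cur
        = (ys.dropWhile (fun k => decide (k < t)),
           cur - ((ys.takeWhile (fun k => decide (k < t))).map (fun k => d.getD k 0)).sum) := by
  intro ys
  induction ys with
  | nil => intro cur; simp [pvTakeSub]
  | cons k ks ih =>
    intro cur
    by_cases h : k < t
    · rw [show pvTakeSub d t (k :: ks) cur = pvTakeSub d t ks (cur - d.getD k 0) from by
        simp [pvTakeSub, h], ih]
      simp only [List.dropWhile_cons, List.takeWhile_cons, decide_eq_true_eq, h, if_pos,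
        decide_true, List.map_cons, List.sum_cons]
      rw [Prod.mk.injEq]
      exact ⟨rfl, by ring⟩
    · rw [show pvTakeSub d t (k :: ks) cur = (k :: ks, cur) from by simp [pvTakeSub, h]]
      simp [List.dropWhile_cons, List.takeWhile_cons, h]

theorem pvDropDrop (t t' : Int) (h : t ≤ t') :
    ∀ xs : List Int,
      (xs.dropWhile (fun k => decide (k < t))).dropWhile (fun k => decide (k < t'))
        = xs.dropWhile (fun k => decide (k < t')) := by
  intro xs
  induction xs with
  | nil => simp
  | cons x xs ih =>
    by_cases hx : x < t
    · simp only [List.dropWhile_cons, decide_eq_true_eq, hx, if_pos, decide_true, ih,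
        show x < t' from by omega]
    · simp [List.dropWhile_cons, hx]

theorem pvTakeWhile_filter (t : Int) :
    ∀ xs : List Int, xs.Pairwise (· ≤ ·) →
      xs.takeWhile (fun k => decide (k < t)) = xs.filter (fun k => decide (k < t)) := by
  intro xs
  induction xs with
  | nil => simp
  | cons x xs ih =>
    intro hp
    rcases List.pairwise_cons.mp hp with ⟨hx, hxs⟩
    by_cases h : x < t
    · simp only [List.takeWhile_cons, List.filter_cons, decide_eq_true_eq, h, if_pos,
        decide_true, ih hxs]
    · simp only [List.takeWhile_cons, List.filter_cons, decide_eq_true_eq, h,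
        decide_false, if_false, Bool.false_eq_true]
      rw [List.filter_eq_nil_iff.mpr]
      intro y hy
      simp only [decide_eq_true_eq]
      have := hx y hy
      omega

theorem pvTakeDrop_filter (t t' : Int) (h : t ≤ t') :
    ∀ xs : List Int, xs.Pairwise (· ≤ ·) →
      (xs.dropWhile (fun k => decide (k < t))).takeWhile (fun k => decide (k < t'))
        = xs.filter (fun k => decide (t ≤ k) && decide (k < t')) := by
  intro xs
  induction xs with
  | nil => simp
  | cons x xs ih =>
    intro hp
    rcases List.pairwise_cons.mp hp with ⟨hx, hxs⟩
    by_cases hxt : x < t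
    · simp only [List.dropWhile_cons, decide_eq_true_eq, hxt, if_pos, decide_true,
        List.filter_cons, show ¬(t ≤ x) from by omega, decide_false, Bool.false_and,
        Bool.false_eq_true, if_false]
      exact ih hxs
    · simp only [List.dropWhile_cons, decide_eq_true_eq, hxt, decide_false, Bool.false_eq_true,
        if_false]
      by_cases hxt' : x < t'
      · simp only [List.takeWhile_cons, List.filter_cons, decide_eq_true_eq, hxt',
          decide_true, show t ≤ x from by omega, Bool.and_self, if_pos]
        rw [pvTakeWhile_filter t' xs hxs]
        refine congrArg (x :: ·) (List.filter_congr ?_)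
        intro y hy
        have := hx y hy
        by_cases hyt' : y < t'
        · simp [hyt', show t ≤ y from by omega]
        · simp [hyt']
      · simp only [List.takeWhile_cons, List.filter_cons, decide_eq_true_eq, hxt',
          decide_false, Bool.and_false, Bool.false_eq_true, if_false]
        rw [List.filter_eq_nil_iff.mpr]
        intro y hy
        have := hx y hy
        simp only [Bool.and_eq_true, decide_eq_true_eq]
        omega

theorem pvSum_filter_eq (xs : List Int) (p : Int → Bool) (g : Int → Int) :
    ((xs.filter p).map g).sum = (xs.map (fun k => if p k then g k else 0)).sum := by
  induction xs with
  | nil => simp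
  | cons x xs ih =>
    by_cases h : p x
    · simp [List.filter_cons, h, ih]
    · simp [List.filter_cons, h, ih]

theorem pvWindow_shift (keys : List Int) (g : Int → Int) (p s w : Int) (hps : p ≤ s) (hw : 0 ≤ w) :
    ((keys.filter (fun k => decide (p ≤ k) && decide (k < p + w))).map g).sum
      + ((keys.filter (fun k => decide (p + w ≤ k) && decide (k < s + w))).map g).sum
      - ((keys.filter (fun k => decide (p ≤ k) && decide (k < s))).map g).sum
    = ((keys.filter (fun k => decide (s ≤ k) && decide (k < s + w))).map g).sum := by
  simp only [pvSum_filter_eq]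
  rw [sub_eq_iff_eq_add, ← PySem.List.sum_map_add_int, ← PySem.List.sum_map_add_int]
  refine congrArg List.sum (List.map_congr_left ?_)
  intro k _
  simp only [Bool.and_eq_true, decide_eq_true_eq]
  split_ifs <;> first | ring1 | (exfalso; omega)

-- the window mass read off the filtered key list
def pvSumWin (d : PySem.Dict Int Int) (keys : List Int) (w s : Int) : Int :=
  ((keys.filter (fun k => decide (s ≤ k) && decide (k < s + w))).map (fun k => d.getD k 0)).sum

-- the best-so-far update B performs, abstracted over the window-mass function
def pvBestStep (F : Int → Int) (ob : Option Int) (s : Int) : Option Int :=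
  match ob with
  | none => some (F s)
  | some b => some (if F s > b then F s else b)

theorem pvSweep_fold (d : PySem.Dict Int Int) (w : Int) (hw : 0 ≤ w) (keys : List Int)
    (hkeys : keys.Pairwise (· ≤ ·)) :
    ∀ (ss : List Int) (p : Int) (b : Option Int), ss.Pairwise (· ≤ ·) → (∀ x ∈ ss, p ≤ x) →
      (ss.foldl (pvSweep d w)
        (keys.dropWhile (fun k => decide (k < p)),
         keys.dropWhile (fun k => decide (k < p + w)),
         pvSumWin d keys w p, b)).2.2.2
      = ss.foldl (pvBestStep (pvSumWin d keys w)) b := by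
  intro ss
  induction ss with
  | nil => intro p b _ _; rfl
  | cons s ss ih =>
    intro p b hpw hge
    have hps : p ≤ s := hge s (List.mem_cons_self ..)
    rcases List.pairwise_cons.mp hpw with ⟨hhead, htail⟩
    simp only [List.foldl_cons]
    have hstep : pvSweep d w
        (keys.dropWhile (fun k => decide (k < p)),
         keys.dropWhile (fun k => decide (k < p + w)),
         pvSumWin d keys w p, b) s
        = (keys.dropWhile (fun k => decide (k < s)),
           keys.dropWhile (fun k => decide (k < s + w)),
           pvSumWin d keys w s, pvBestStep (pvSumWin d keys w) b s) := by
      simp only [pvSweep, pvTakeAdd_spec, pvTakeSub_spec]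
      rw [pvDropDrop (p + w) (s + w) (by omega), pvDropDrop p s hps,
        pvTakeDrop_filter (p + w) (s + w) (by omega) keys hkeys,
        pvTakeDrop_filter p s hps keys hkeys]
      have hcur : pvSumWin d keys w p
            + ((keys.filter (fun k => decide (p + w ≤ k) && decide (k < s + w))).map
                (fun k => d.getD k 0)).sum
            - ((keys.filter (fun k => decide (p ≤ k) && decide (k < s))).map
                (fun k => d.getD k 0)).sum
          = pvSumWin d keys w s := pvWindow_shift keys _ p s w hps hw
      rw [show pvSumWin d keys w p
            + ((keys.filter (fun k => decide (p + w ≤ k) && decide (k < s + w))).map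
                (fun k => d.getD k 0)).sum
            - ((keys.filter (fun k => decide (p ≤ k) && decide (k < s))).map
                (fun k => d.getD k 0)).sum
          = (pvSumWin d keys w p
            + ((keys.filter (fun k => decide (p + w ≤ k) && decide (k < s + w))).map
                (fun k => d.getD k 0)).sum)
            - ((keys.filter (fun k => decide (p ≤ k) && decide (k < s))).map
                (fun k => d.getD k 0)).sum from rfl] at hcur
      rw [hcur]
      rfl
    rw [hstep]
    exact ih s (pvBestStep (pvSumWin d keys w) b s) htail hhead

theorem pvCandStep_mem (w lo hi : Int) (c : PySem.Set Int) (k x : Int) :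
    x ∈ pvCandStep w lo hi c k
      ↔ x ∈ c ∨ ((x = k - w + 1 ∨ x = k + 1) ∧ lo ≤ x ∧ x ≤ hi) := by
  unfold pvCandStep
  by_cases h1 : lo ≤ k - w + 1 ∧ k - w + 1 ≤ hi
  · by_cases h2 : lo ≤ k + 1 ∧ k + 1 ≤ hi
    · rw [if_pos h1, if_pos h2]
      simp only [PySem.Set.mem_add]
      constructor
      · rintro ((hc | he) | he)
        · exact Or.inl hc
        · exact Or.inr ⟨Or.inl he, by omega⟩
        · exact Or.inr ⟨Or.inr he, by omega⟩
      · rintro (hc | ⟨(he | he), _⟩)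
        · exact Or.inl (Or.inl hc)
        · exact Or.inl (Or.inr he)
        · exact Or.inr he
    · rw [if_pos h1, if_neg h2]
      simp only [PySem.Set.mem_add]
      constructor
      · rintro (hc | he)
        · exact Or.inl hc
        · exact Or.inr ⟨Or.inl he, by omega⟩
      · rintro (hc | ⟨(he | he), hb⟩)
        · exact Or.inl hc
        · exact Or.inr he
        · exact absurd (he ▸ hb) h2
  · by_cases h2 : lo ≤ k + 1 ∧ k + 1 ≤ hi
    · rw [if_neg h1, if_pos h2]
      simp only [PySem.Set.mem_add]
      constructor
      · rintro (hc | he)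
        · exact Or.inl hc
        · exact Or.inr ⟨Or.inr he, by omega⟩
      · rintro (hc | ⟨(he | he), hb⟩)
        · exact Or.inl hc
        · exact absurd (he ▸ hb) h1
        · exact Or.inr he
    · rw [if_neg h1, if_neg h2]
      constructor
      · exact Or.inl
      · rintro (hc | ⟨(he | he), hb⟩)
        · exact hc
        · exact absurd (he ▸ hb) h1
        · exact absurd (he ▸ hb) h2

theorem pvCands_mem (w lo hi : Int) :
    ∀ (ks : List Int) (c0 : PySem.Set Int) (x : Int),
      x ∈ ks.foldl (pvCandStep w lo hi) c0
        ↔ x ∈ c0 ∨ ∃ k ∈ ks, (x = k - w + 1 ∨ x = k + 1) ∧ lo ≤ x ∧ x ≤ hi := by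
  intro ks
  induction ks with
  | nil => intro c0 x; simp
  | cons k ks ih =>
    intro c0 x
    simp only [List.foldl_cons, ih, pvCandStep_mem, List.mem_cons]
    constructor
    · rintro ((hc | he) | ⟨k', hk', he⟩)
      · exact Or.inl hc
      · exact Or.inr ⟨k, Or.inl rfl, he⟩
      · exact Or.inr ⟨k', Or.inr hk', he⟩
    · rintro (hc | ⟨k', (rfl | hk'), he⟩)
      · exact Or.inl (Or.inl hc)
      · exact Or.inl (Or.inr he)
      · exact Or.inr ⟨k', hk', he⟩

theorem pvBest_some (F : Int → Int) :
    ∀ (l : List Int) (b : Int),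
      l.foldl (pvBestStep F) (some b) = some (l.foldl (fun m s => max m (F s)) b) := by
  intro l
  induction l with
  | nil => intro b; rfl
  | cons s l ih =>
    intro b
    simp only [List.foldl_cons, pvBestStep, ih]
    have : (if F s > b then F s else b) = max b (F s) := by split_ifs <;> omega
    rw [this]

-- max over the candidate list = max over the whole interval [lo, hi]
theorem pvMax_over_cands (F : Int → Int) (lo hi : Int) (hlohi : lo ≤ hi) (cs : List Int)
    (hlo : lo ∈ cs) (hmem : ∀ s ∈ cs, lo ≤ s ∧ s ≤ hi)
    (hclosed : ∀ s : Int, lo < s → s ≤ hi → s ∉ cs → F s = F (s - 1)) :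
    cs.foldl (pvBestStep F) none = some (pvMaxOver F lo (hi - lo).toNat) := by
  obtain ⟨c, cs', rfl⟩ : ∃ c cs', cs = c :: cs' := by
    cases cs with
    | nil => exact absurd hlo (by simp)
    | cons c cs' => exact ⟨c, cs', rfl⟩
  rw [List.foldl_cons, show pvBestStep F none c = some (F c) from rfl, pvBest_some]
  congr 1
  set M := cs'.foldl (fun m s => max m (F s)) (F c) with hM
  have hM' : M = (cs'.map F).foldl max (F c) := by rw [hM, List.foldl_map]
  have hub : ∀ s ∈ c :: cs', F s ≤ M := by
    intro s hs
    rcases List.mem_cons.mp hs with rfl | hs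
    · rw [hM']; exact (PySem.List.le_foldl_max _ _).1
    · rw [hM']
      exact (PySem.List.le_foldl_max _ _).2 (F s) (List.mem_map_of_mem hs)
  have hmemM : ∃ s ∈ c :: cs', M = F s := by
    rcases PySem.List.foldl_max_mem (cs'.map F) (F c) with hh | hh
    · exact ⟨c, List.mem_cons_self .., by rw [hM', hh]⟩
    · rcases List.mem_map.mp hh with ⟨s, hs, he⟩
      exact ⟨s, List.mem_cons_of_mem _ hs, by rw [hM']; exact he.symm⟩
  refine le_antisymm ?_ ?_
  · rcases hmemM with ⟨s, hs, he⟩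
    rcases hmem s hs with ⟨h1, h2⟩
    have : F s = F (lo + ((s - lo).toNat : Int)) := by
      congr 1; omega
    rw [he, this]
    exact pvMaxOver_ge F lo (hi - lo).toNat (s - lo).toNat (by omega)
  · refine pvMaxOver_le F lo (hi - lo).toNat M ?_
    intro t
    induction t using Nat.strong_induction_on with
    | _ t iht =>
      intro ht
      by_cases hin : (lo + (t : Int)) ∈ c :: cs'
      · exact hub _ hin
      · have ht0 : t ≠ 0 := by
          rintro rfl
          exact hin (by simpa using hlo)
        have heq : F (lo + (t : Int)) = F (lo + (t : Int) - 1) :=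
          hclosed (lo + (t : Int)) (by omega) (by omega) hin
        have hcast : lo + (t : Int) - 1 = lo + ((t - 1 : Nat) : Int) := by omega
        rw [heq, hcast]
        exact iht (t - 1) (by omega) (by omega)

theorem pvDropWhile_ge (t : Int) :
    ∀ xs : List Int, (∀ k ∈ xs, ¬(k < t)) → xs.dropWhile (fun k => decide (k < t)) = xs := by
  intro xs h
  cases xs with
  | nil => rfl
  | cons x xs =>
    rw [List.dropWhile_cons, if_neg]
    simp only [decide_eq_true_eq]
    exact h x (List.mem_cons_self ..)

theorem pvSumWin_eq_pvF (d : PySem.Dict Int Int) (hnd : d.keys.Nodup) (w lo hi s : Int)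
    (hs1 : lo ≤ s) (hs2 : s ≤ hi) :
    pvSumWin d
      (PySem.List.sorted (d.keys.filter (fun k => decide (lo ≤ k) && decide (k < hi + w)))
        (fun x => x)) w s
      = pvF d w s := by
  unfold pvSumWin
  have hperm := PySem.List.sorted_perm
    (d.keys.filter (fun k => decide (lo ≤ k) && decide (k < hi + w))) (fun x => x) false
  have hperm2 := (hperm.filter (fun k => decide (s ≤ k) && decide (k < s + w))).map
    (fun k => d.getD k 0)
  rw [hperm2.sum_eq, List.filter_filter]
  have hfc : (d.keys.filter (fun k =>
        (decide (s ≤ k) && decide (k < s + w)) && (decide (lo ≤ k) && decide (k < hi + w))))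
      = d.keys.filter (fun k => decide (s ≤ k) && decide (k < s + w)) := by
    refine List.filter_congr ?_
    intro k _
    by_cases hwin : s ≤ k ∧ k < s + w
    · rw [decide_eq_true hwin.1, decide_eq_true hwin.2,
        decide_eq_true (show lo ≤ k by omega), decide_eq_true (show k < hi + w by omega)]
      rfl
    · rcases Decidable.not_and_iff_or_not.mp hwin with hh | hh
      · rw [decide_eq_false hh]
        simp
      · rw [decide_eq_false hh]
        simp
  rw [hfc, pvSum_filter_eq]
  unfold pvF
  rw [PySem.Dict.items_eq_map_keys d hnd 0, List.map_map]
  refine congrArg List.sum (List.map_congr_left ?_)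
  intro k _
  simp only [Function.comp]
  by_cases hwin : s ≤ k ∧ k < s + w
  · rw [if_pos hwin, if_pos (by simp [hwin.1, hwin.2])]
  · rw [if_neg hwin, if_neg (by simpa using hwin)]

theorem pvClosed (d : PySem.Dict Int Int) (w lo hi : Int) (hw : 2 ≤ w)
    (s : Int) (hlo : lo < s) (hhi : s ≤ hi)
    (hnot : s ∉ ((PySem.List.sorted (d.keys.filter (fun k => decide (lo ≤ k) && decide (k < hi + w)))
        (fun x => x)).foldl (pvCandStep w lo hi) (PySem.Set.ofList [lo]) : List Int)) :
    pvF d w s = pvF d w (s - 1) := by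
  set keys := PySem.List.sorted
    (d.keys.filter (fun k => decide (lo ≤ k) && decide (k < hi + w))) (fun x => x) with hkeysdef
  rw [pvCands_mem w lo hi keys (PySem.Set.ofList [lo]) s] at hnot
  push_neg at hnot
  rcases hnot with ⟨_, hforall⟩
  have hkey : ∀ k ∈ keys, s ≠ k - w + 1 ∧ s ≠ k + 1 := by
    intro k hk
    constructor
    · intro he
      have := hforall k hk (Or.inl he) (by omega)
      omega
    · intro he
      have := hforall k hk (Or.inr he) (by omega)
      omega
  have hmemkeys : ∀ k : Int, k ∈ d.keys → lo ≤ k → k < hi + w → k ∈ keys := by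
    intro k hk h1 h2
    rw [hkeysdef, PySem.List.mem_sorted]
    refine List.mem_filter.mpr ⟨hk, ?_⟩
    simp [h1, h2]
  unfold pvF
  refine congrArg List.sum (List.map_congr_left ?_)
  intro kv hkv
  have hkmem : kv.1 ∈ d.keys := by
    simp only [PySem.Dict.keys]
    exact List.mem_map_of_mem hkv
  have hne1 : kv.1 ≠ s - 1 := by
    intro he
    have hk : kv.1 ∈ keys := hmemkeys kv.1 hkmem (by omega) (by omega)
    exact absurd (by omega : s = kv.1 + 1) (hkey kv.1 hk).2
  have hne2 : kv.1 ≠ s + w - 1 := by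
    intro he
    have hk : kv.1 ∈ keys := hmemkeys kv.1 hkmem (by omega) (by omega)
    exact absurd (by omega : s = kv.1 - w + 1) (hkey kv.1 hk).1
  split_ifs <;> first | rfl | (exfalso; omega)

-- PART B main: port B's sweep over the candidate starts computes the same interval max
theorem portB_eq (d : PySem.Dict Int Int) (w lo hi : Int) (hw : 2 ≤ w) (hlohi : lo ≤ hi)
    (hnd : d.keys.Nodup) :
    ((((PySem.List.sorted
          ((PySem.List.sorted (d.keys.filter (fun k => decide (lo ≤ k) && decide (k < hi + w)))
            (fun x => x)).foldl (pvCandStep w lo hi) (PySem.Set.ofList [lo]))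
          (fun x => x)).foldl (pvSweep d w)
        ((PySem.List.sorted (d.keys.filter (fun k => decide (lo ≤ k) && decide (k < hi + w)))
            (fun x => x)),
         (PySem.List.sorted (d.keys.filter (fun k => decide (lo ≤ k) && decide (k < hi + w)))
            (fun x => x)), 0, none)).2.2.2).getD 0)
    = pvMaxOver (pvF d w) lo (hi - lo).toNat := by
  set keys := PySem.List.sorted
    (d.keys.filter (fun k => decide (lo ≤ k) && decide (k < hi + w))) (fun x => x) with hkeysdef
  set scands := PySem.List.sorted (keys.foldl (pvCandStep w lo hi) (PySem.Set.ofList [lo]))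
    (fun x => x) with hscandsdef
  have hsortk : keys.Pairwise (· ≤ ·) := PySem.List.sorted_pairwise _ _
  have hmemk : ∀ k ∈ keys, lo ≤ k ∧ k < hi + w := by
    intro k hk
    rw [hkeysdef, PySem.List.mem_sorted] at hk
    rcases List.mem_filter.mp hk with ⟨_, hb⟩
    simpa using hb
  have hsortc : scands.Pairwise (· ≤ ·) := PySem.List.sorted_pairwise _ _
  have hmemc : ∀ x ∈ scands, lo ≤ x ∧ x ≤ hi := by
    intro x hx
    rw [hscandsdef, PySem.List.mem_sorted, pvCands_mem] at hx
    rcases hx with hx | ⟨k, _, _, hb⟩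
    · rcases (PySem.Set.mem_ofList _ _).mp hx with hx
      have : x = lo := by simpa using hx
      exact ⟨le_of_eq this.symm, this ▸ hlohi⟩
    · exact hb
  have hI1 : keys.dropWhile (fun k => decide (k < lo - w)) = keys :=
    pvDropWhile_ge _ _ (fun k hk => by have := hmemk k hk; omega)
  have hI2 : keys.dropWhile (fun k => decide (k < (lo - w) + w)) = keys :=
    pvDropWhile_ge _ _ (fun k hk => by have := hmemk k hk; omega)
  have hcur0 : pvSumWin d keys w (lo - w) = 0 := by
    unfold pvSumWin
    rw [List.filter_eq_nil_iff.mpr]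
    · rfl
    · intro k hk
      have := hmemk k hk
      simp only [Bool.and_eq_true, decide_eq_true_eq]
      omega
  have hfold := pvSweep_fold d w (by omega) keys hsortk scands (lo - w) none hsortc
    (fun x hx => by have := hmemc x hx; omega)
  rw [hI1, hI2, hcur0] at hfold
  rw [hfold]
  have hcongr : scands.foldl (pvBestStep (pvSumWin d keys w)) none
      = scands.foldl (pvBestStep (pvF d w)) none := by
    refine PySem.List.foldl_congr_mem scands (pvBestStep (pvSumWin d keys w))
      (pvBestStep (pvF d w)) none ?_
    intro acc x hx
    rcases hmemc x hx with ⟨h1, h2⟩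
    have he : pvSumWin d keys w x = pvF d w x := pvSumWin_eq_pvF d hnd w lo hi x h1 h2
    unfold pvBestStep
    cases acc <;> simp [he]
  rw [hcongr, pvMax_over_cands (pvF d w) lo hi hlohi scands ?_ hmemc ?_]
  · rfl
  · rw [hscandsdef, PySem.List.mem_sorted, pvCands_mem]
    exact Or.inl ((PySem.Set.mem_ofList _ _).mpr (by simp))
  · intro t h1 h2 hnotin
    refine pvClosed d w lo hi hw t h1 h2 ?_
    rw [hscandsdef, PySem.List.mem_sorted] at hnotin
    exact hnotin

theorem pvKeys_ne_nil (d : PySem.Dict Int Int) (h : d.items ≠ []) : d.keys ≠ [] := by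
  simp only [PySem.Dict.keys]
  exact fun hc => h (List.map_eq_nil_iff.mp hc)


-- ===== VERDICT (by name: the statement is the Claim_ definition above) =====
theorem max_rolling_count_py_spec : Claim_equal_max_rolling_count_py := by
  intro counter bins window _
  unfold Spec_max_rolling_count_py max_rolling_count_py max_rolling_count_py_alt
  set d := PySem.Dict.ofList counter with hd
  by_cases h0 : d.items = []
  · rw [if_pos h0, if_pos h0]
  · rw [if_neg h0, if_neg h0]
    by_cases hw1 : window ≤ 1
    · rw [if_pos hw1, if_pos hw1]
      by_cases hb : bins = []
      · subst hb
        rw [if_pos rfl]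
        simp [PySem.List.max?]
      · rw [if_neg hb]
    · rw [if_neg hw1, if_neg hw1]
      have hne : (if bins = [] then d.keys else bins) ≠ [] := by
        by_cases hb : bins = []
        · rw [if_pos hb]; exact pvKeys_ne_nil d h0
        · rw [if_neg hb]; exact hb
      obtain ⟨lo, hlo⟩ : ∃ lo, PySem.List.min? (if bins = [] then d.keys else bins) (fun x => x) = some lo := by
        cases hmin : PySem.List.min? (if bins = [] then d.keys else bins) (fun x => x) with
        | none => exact absurd ((PySem.List.min?_eq_none_iff _ _).mp hmin) hne
        | some a => exact ⟨a, rfl⟩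
      obtain ⟨hi, hhi⟩ : ∃ hi, PySem.List.max? (if bins = [] then d.keys else bins) (fun x => x) = some hi := by
        cases hmax : PySem.List.max? (if bins = [] then d.keys else bins) (fun x => x) with
        | none => exact absurd ((PySem.List.max?_eq_none_iff _ _).mp hmax) hne
        | some a => exact ⟨a, rfl⟩
      have hlohi : lo ≤ hi :=
        PySem.List.max?_isMax hhi lo (PySem.List.min?_mem hlo)
      simp only [hlo, hhi, Option.getD_some]
      rw [portB_eq d window lo hi (by omega) hlohi (PySem.Dict.nodup_keys_ofList counter)]
      exact portA_eq d window lo hi (by omega) hlohi
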